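-- pv_equiv track=rewrite | github.com/dflaten/learningprograms | MIT6001/pset3/ps3.py | is_valid_word
-- ===== SOURCE A (Python) =====
-- import copy
--
-- VOWELS = 'aeiou'
--
-- def is_valid_word(word, hand, word_list):
--     """
--     Returns True if word is in the word_list and is entirely
--     composed of letters in the hand. Otherwise, returns False.
--     Does not mutate hand or word_list.
--
--     word: string
--     hand: dictionary (string -> int)
--     word_list: list of lowercase strings
--     returns: boolean
--     """
--     def check_word(word, hand, word_list):
--         word = word.lower()
--         newhand  = copy.deepcopy(hand)
--         if word in word_list:
--             for letter in word:
--                 if letter in newhand: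
--                     if newhand[letter] > 0:
--                         newhand[letter] -= 1
--                     elif newhand[letter] <= 0:
--                         return False
--                 else:
--                     return False
--             return True
--         else:
--             return False
--
--     wildplace = word.find('*')
--     if wildplace > 0:
--         for vowel in VOWELS:
--             word = word[0:wildplace] + vowel + word[wildplace + 1:len(word)]
--             replacedhand = copy.deepcopy(hand)
--            #add vowel we are testing to hand
--             replacedhand[vowel] = hand.get(vowel, 0) + 1
--             isword = check_word(word, replacedhand, word_list)
--             if isword:
--                 return True
--         return False
--     else:
--         return check_word(word, hand, word_list)
-- ===== SOURCE B (Python) =====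
-- VOWELS = 'aeiou'
--
-- def is_valid_word(word, hand, word_list):
--     def fits(w, h):
--         lw = w.lower()
--         return lw in word_list and all(lw.count(c) <= h.get(c, 0) for c in set(lw))
--
--     i = word.find('*')
--     if i > 0:
--         return any(fits(word[:i] + v + word[i + 1:], {**hand, v: hand.get(v, 0) + 1})
--                    for v in VOWELS)
--     return fits(word, hand)
-- ===== Notes on version B (the rewrite author's own statement) =====
-- stated objective: simpler
-- what changed: The deepcopy-and-decrement letter loop of check_word is replaced by a count-then-compare pass (word in list, and each distinct letter's count in the lowered word is at most its hand count), and the explicit vowel for-loop with early return becomes an any() over the five wildcard substitutions; the outer wildcard dispatch (wildplace > 0, vowel added to the hand) is preserved.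
import Mathlib
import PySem

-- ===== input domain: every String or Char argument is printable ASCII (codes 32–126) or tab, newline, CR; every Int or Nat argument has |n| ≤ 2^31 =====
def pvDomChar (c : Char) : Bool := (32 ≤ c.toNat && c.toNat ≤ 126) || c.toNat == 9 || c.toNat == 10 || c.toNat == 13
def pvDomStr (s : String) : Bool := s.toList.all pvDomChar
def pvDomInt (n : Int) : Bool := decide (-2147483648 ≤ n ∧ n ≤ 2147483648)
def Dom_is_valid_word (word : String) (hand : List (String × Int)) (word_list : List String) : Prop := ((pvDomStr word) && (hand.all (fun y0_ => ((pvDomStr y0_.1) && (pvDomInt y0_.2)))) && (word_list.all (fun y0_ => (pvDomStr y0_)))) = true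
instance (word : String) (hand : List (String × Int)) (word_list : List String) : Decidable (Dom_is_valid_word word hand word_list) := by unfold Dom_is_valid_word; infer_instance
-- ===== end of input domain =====

-- B replaces A's deepcopy-and-decrement letter loop by a count-then-compare pass
-- (word in list, and each distinct letter's count ≤ its hand count); objective: simpler.

-- ===== PORT A =====
def pvVowels : List Char := ['a', 'e', 'i', 'o', 'u']

-- the 'for letter in word' loop of check_word, decrementing a copy of the hand
def pvCheckLettersA (newhand : PySem.Dict String Int) : List Char → Bool
  | [] => true
  | c :: rest =>
    match newhand.get? (String.singleton c) with
    | some v =>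
      if v > 0 then pvCheckLettersA (newhand.insert (String.singleton c) (v - 1)) rest
      else false
    | none => false

-- check_word(word, hand, word_list)
def pvCheckWordA (w : List Char) (hand : PySem.Dict String Int) (wl : List (List Char)) : Bool :=
  let lw := PySem.Chars.lower w
  if wl.contains lw then pvCheckLettersA hand lw else false

-- the 'for vowel in VOWELS' loop; the reassigned word is threaded through, as in A
def pvVowelLoopA (hand : PySem.Dict String Int) (wl : List (List Char)) (wp : Int) :
    List Char → List Char → Bool
  | _, [] => false
  | w, v :: vs =>
    let w' := PySem.Chars.slice w (some 0) (some wp) ++ [v] ++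
              PySem.Chars.slice w (some (wp + 1)) (some (PySem.Chars.len w))
    let rh := hand.insert (String.singleton v) (hand.getD (String.singleton v) 0 + 1)
    if pvCheckWordA w' rh wl then true else pvVowelLoopA hand wl wp w' vs

def is_valid_word (word : String) (hand : List (String × Int)) (word_list : List String) : Bool :=
  let d : PySem.Dict String Int := PySem.Dict.mk hand
  let wl := word_list.map String.toList
  let wildplace := PySem.Chars.find word.toList ['*']
  if wildplace > 0 then pvVowelLoopA d wl wildplace word.toList pvVowels
  else pvCheckWordA word.toList d wl

-- ===== PORT B =====
-- fits(w, h): lw in word_list and every distinct letter's count fits the hand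
def pvFitsB (w : List Char) (h : PySem.Dict String Int) (wl : List (List Char)) : Bool :=
  let lw := PySem.Chars.lower w
  wl.contains lw &&
    (PySem.Set.ofList lw).all (fun c =>
      decide ((PySem.Chars.count lw [c] : Int) ≤ h.getD (String.singleton c) 0))

def is_valid_word_alt (word : String) (hand : List (String × Int)) (word_list : List String) : Bool :=
  let d : PySem.Dict String Int := PySem.Dict.mk hand
  let wl := word_list.map String.toList
  let i := PySem.Chars.find word.toList ['*']
  if i > 0 then
    pvVowels.any (fun v =>
      pvFitsB (PySem.Chars.slice word.toList (some 0) (some i) ++ [v] ++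
               PySem.Chars.slice word.toList (some (i + 1)) none)
        (d.insert (String.singleton v) (d.getD (String.singleton v) 0 + 1)) wl)
  else pvFitsB word.toList d wl

-- ===== PRECONDITION & SPEC =====
def Spec_is_valid_word (word : String) (hand : List (String × Int)) (word_list : List String) (out : Bool) : Prop := out = is_valid_word_alt word hand word_list
instance (word : String) (hand : List (String × Int)) (word_list : List String) (out : Bool) : Decidable (Spec_is_valid_word word hand word_list out) := by unfold Spec_is_valid_word; infer_instance

-- ===== CLAIM (what is proved, stated in full; the proofs are below) =====
def Claim_equal_is_valid_word : Prop := ∀ (word : String) (hand : List (String × Int)) (word_list : List String), Dom_is_valid_word word hand word_list → Spec_is_valid_word word hand word_list (is_valid_word word hand word_list)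

-- ===== LEMMAS AND PROOFS =====

lemma pvSingleton_inj {c c' : Char} (h : String.singleton c = String.singleton c') : c = c' := by
  have := congrArg String.toList h
  simpa using this

-- Python's s.count(c) for a single character is the list count
lemma pvCount_go_singleton (c : Char) : ∀ (fuel : Nat) (l : List Char) (acc : Nat), l.length ≤ fuel →
    PySem.Chars.count.go [c] fuel l acc = acc + l.count c := by
  intro fuel
  induction fuel with
  | zero => intro l acc h; rw [PySem.Chars.count.go]; simp at h; simp [h]
  | succ n ih =>
    intro l acc h
    cases l with
    | nil => rw [PySem.Chars.count.go]; simp; omega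
    | cons x t =>
      rw [PySem.Chars.count.go]
      by_cases hx : x = c
      · simp [hx, List.isPrefixOf, ih t _ (by simpa using h)]; omega
      · have hp : ([c].isPrefixOf (x :: t)) = false := by
          simp [List.isPrefixOf]; exact fun hcx => hx hcx.symm
        simp [hp, hx, ih t _ (by simpa using h)]

lemma pvCount_singleton (c : Char) (l : List Char) : PySem.Chars.count l [c] = l.count c := by
  rw [PySem.Chars.count]
  simp [pvCount_go_singleton c l.length l 0 le_rfl]

-- A's decrement loop succeeds iff every distinct letter's count fits the hand
lemma pvCheckLettersA_iff (cs : List Char) : ∀ (d : PySem.Dict String Int),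
    pvCheckLettersA d cs = true ↔
      ∀ c ∈ cs, ((cs.count c : Int) ≤ d.getD (String.singleton c) 0) := by
  induction cs with
  | nil => intro d; simp [pvCheckLettersA]
  | cons c rest ih =>
    intro d
    rw [pvCheckLettersA]
    cases hg : d.get? (String.singleton c) with
    | none =>
      simp only [Bool.false_eq_true, false_iff]
      intro h
      have := h c (List.mem_cons_self)
      rw [PySem.Dict.getD_of_get?_eq_none d 0 hg] at this
      have hcount : 0 < (c :: rest).count c := by simp
      omega
    | some v =>
      by_cases hv : v > 0
      · simp only [hv, if_true]
        rw [ih]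
        constructor
        · intro H c' hc'
          by_cases hcc : c' = c
          · subst hcc
            rw [PySem.Dict.getD_of_get?_eq_some d 0 hg]
            have hcount : (c' :: rest).count c' = rest.count c' + 1 := by simp
            by_cases hmem : c' ∈ rest
            · have := H c' hmem
              rw [PySem.Dict.getD_insert] at this
              simp at this
              omega
            · have : rest.count c' = 0 := List.count_eq_zero.mpr hmem
              omega
          · have hmem : c' ∈ rest := by
              rcases List.mem_cons.mp hc' with h | h
              · exact absurd h hcc
              · exact h
            have := H c' hmem
            rw [PySem.Dict.getD_insert] at this
            rw [if_neg (fun h => hcc (pvSingleton_inj h))] at this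
            have hcount : (c :: rest).count c' = rest.count c' := by
              simp [Ne.symm hcc]
            rw [hcount]
            exact this
        · intro H c' hmem
          rw [PySem.Dict.getD_insert]
          by_cases hcc : c' = c
          · subst hcc
            rw [if_pos rfl]
            have := H c' (List.mem_cons_self)
            rw [PySem.Dict.getD_of_get?_eq_some d 0 hg] at this
            have hcount : (c' :: rest).count c' = rest.count c' + 1 := by simp
            omega
          · rw [if_neg (fun h => hcc (pvSingleton_inj h))]
            have := H c' (List.mem_cons_of_mem c hmem)
            have hcount : (c :: rest).count c' = rest.count c' := by
              simp [Ne.symm hcc]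
            omega
      · simp only [hv, if_false, Bool.false_eq_true, false_iff]
        intro h
        have := h c (List.mem_cons_self)
        rw [PySem.Dict.getD_of_get?_eq_some d 0 hg] at this
        have hcount : 0 < (c :: rest).count c := by simp
        omega

-- check_word and fits agree on every input
lemma pvCheckWordA_eq_fitsB (w : List Char) (d : PySem.Dict String Int) (wl : List (List Char)) :
    pvCheckWordA w d wl = pvFitsB w d wl := by
  simp only [pvCheckWordA, pvFitsB]
  cases hc : wl.contains (PySem.Chars.lower w) with
  | false => simp
  | true =>
    simp only [Bool.true_and, if_true]
    rw [Bool.eq_iff_iff, pvCheckLettersA_iff, List.all_eq_true]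
    constructor
    · intro H c hc'
      have hmem : c ∈ PySem.Chars.lower w := (PySem.Set.mem_ofList _ _).mp hc'
      simpa [pvCount_singleton] using H c hmem
    · intro H c hmem
      have := H c ((PySem.Set.mem_ofList _ _).mpr hmem)
      simpa [pvCount_singleton] using this

-- slicing a word of shape p ++ [v] ++ s (|p| = wp) reproduces p and s
lemma pvSlice_prefix (p s : List Char) (v : Char) (wp : Int) (hwp : 0 ≤ wp)
    (hlen : p.length = wp.toNat) :
    PySem.Chars.slice (p ++ [v] ++ s) (some 0) (some wp) = p := by
  simp only [PySem.Chars.slice_eq_listSlice]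
  rw [PySem.List.slice_zero_start, PySem.List.slice_to _ hwp]
  rw [← hlen, List.append_assoc, List.take_left]

lemma pvSlice_suffix (p s : List Char) (v : Char) (wp : Int) (hwp : 0 ≤ wp)
    (hlen : p.length = wp.toNat) :
    PySem.Chars.slice (p ++ [v] ++ s) (some (wp + 1)) (some (PySem.Chars.len (p ++ [v] ++ s))) = s := by
  simp only [PySem.Chars.slice_eq_listSlice, PySem.Chars.len_eq]
  rw [PySem.List.slice_toNat _ (by omega) (Int.natCast_nonneg _)]
  have h1 : (wp + 1).toNat = p.length + 1 := by omega
  have h2 : ((((p ++ [v] ++ s).length : Int)).toNat) = (p ++ [v] ++ s).length := by omega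
  rw [h1, h2]
  have hdrop : (p ++ [v] ++ s).drop (p.length + 1) = s := by
    have hassoc : p ++ [v] ++ s = (p ++ [v]) ++ s := by simp
    have hl : (p ++ [v]).length = p.length + 1 := by simp
    rw [hassoc, ← hl, List.drop_left]
  rw [hdrop]
  apply List.take_of_length_le
  simp
  omega

-- A's vowel loop, with the word threaded through, is B's any over the original slices
lemma pvVowelLoopA_eq (d : PySem.Dict String Int) (wl : List (List Char)) (wp : Int)
    (p s : List Char) (hwp : 0 ≤ wp) (hlen : p.length = wp.toNat) :
    ∀ (vs : List Char) (w0 : List Char),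
      PySem.Chars.slice w0 (some 0) (some wp) = p →
      PySem.Chars.slice w0 (some (wp + 1)) (some (PySem.Chars.len w0)) = s →
      pvVowelLoopA d wl wp w0 vs =
        vs.any (fun v => pvCheckWordA (p ++ [v] ++ s)
          (d.insert (String.singleton v) (d.getD (String.singleton v) 0 + 1)) wl) := by
  intro vs
  induction vs with
  | nil => intro w0 _ _; simp [pvVowelLoopA]
  | cons v rest ih =>
    intro w0 hp hs
    rw [pvVowelLoopA]
    have hrec := ih (p ++ [v] ++ s) (pvSlice_prefix p s v wp hwp hlen)
      (pvSlice_suffix p s v wp hwp hlen)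
    rw [List.any_cons]
    simp only [hp, hs, List.append_assoc, List.cons_append, List.nil_append] at hrec ⊢
    rw [hrec]
    cases pvCheckWordA (p ++ v :: s)
        (d.insert (String.singleton v) (d.getD (String.singleton v) 0 + 1)) wl <;>
      simp

-- ===== VERDICT (by name: the statement is the Claim_ definition above) =====
theorem is_valid_word_spec : Claim_equal_is_valid_word := by
  intro word hand word_list _
  unfold Spec_is_valid_word
  simp only [is_valid_word, is_valid_word_alt]
  set w := word.toList with hw
  set d : PySem.Dict String Int := PySem.Dict.mk hand with hd
  set wl := word_list.map String.toList with hwl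
  set wp := PySem.Chars.find w ['*'] with hwp
  by_cases hpos : wp > 0
  · simp only [hpos, if_true]
    have hwp0 : 0 ≤ wp := by omega
    have hle : wp ≤ (w.length : Int) := PySem.Chars.find_le_length w ['*']
    set p := PySem.Chars.slice w (some 0) (some wp) with hp
    set s := PySem.Chars.slice w (some (wp + 1)) (some (PySem.Chars.len w)) with hs
    have hlen : p.length = wp.toNat := by
      rw [hp]
      simp only [PySem.Chars.slice_eq_listSlice]
      rw [PySem.List.slice_zero_start, PySem.List.slice_to _ hwp0]
      simp
      omega
    rw [pvVowelLoopA_eq d wl wp p s hwp0 hlen pvVowels w rfl rfl]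
    have hsuf : PySem.Chars.slice w (some (wp + 1)) none = s := by
      rw [hs]
      simp only [PySem.Chars.slice_eq_listSlice, PySem.Chars.len_eq]
      rw [PySem.List.slice_from _ (by omega),
          PySem.List.slice_toNat _ (by omega) (Int.natCast_nonneg _)]
      refine (List.take_of_length_le ?_).symm
      simp
    rw [hsuf]
    apply PySem.List.any_congr_mem
    intro v _
    rw [pvCheckWordA_eq_fitsB]
  · simp only [hpos, if_false]
    exact pvCheckWordA_eq_fitsB w d wl
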